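-- pv_equiv track=rewrite | github.com/xianhe-zhang/leetcodeNote | 2023找工/2-snowflakeoa.py | check
-- ===== SOURCE A (Python) =====
-- def check(s: str, state: int) -> bool:
--     left, right = 0, len(s) - 1
--     # 检查 state 对应的子序列是不是回文串
--     while left < right:
--         # 将 left 和 right 对应上 「状态所对应的字符」 位置
--         while left < right and (state >> left & 1) == 0:
--             left += 1
--         while left < right and (state >> right & 1) == 0:
--             right -= 1
--         if s[left] != s[right]:
--             return False
--         left += 1
--         right -= 1
--
--     return True
-- ===== SOURCE B (Python) =====
-- def check(s: str, state: int) -> bool: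
--     sub = [s[i] for i in range(len(s)) if state >> i & 1]
--     return sub == sub[::-1]
-- ===== Notes on version B (the rewrite author's own statement) =====
-- stated objective: simpler
-- what changed: Replaced A's in-place two-pointer scan with nested bit-skipping loops by a one-pass comprehension that materialises the bit-selected subsequence and compares it with its reversal.
import Mathlib
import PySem

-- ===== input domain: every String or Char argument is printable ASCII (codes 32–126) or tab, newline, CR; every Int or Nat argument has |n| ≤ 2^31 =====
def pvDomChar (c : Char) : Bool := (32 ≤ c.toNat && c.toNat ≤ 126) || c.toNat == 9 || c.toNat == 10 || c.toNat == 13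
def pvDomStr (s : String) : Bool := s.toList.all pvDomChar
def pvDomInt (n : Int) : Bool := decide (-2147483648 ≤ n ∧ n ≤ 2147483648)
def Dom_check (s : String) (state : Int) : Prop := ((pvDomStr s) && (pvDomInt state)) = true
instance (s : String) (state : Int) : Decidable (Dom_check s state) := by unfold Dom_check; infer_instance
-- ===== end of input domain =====

-- B replaces A's in-place two-pointer skip-scan by materialising the selected
-- subsequence in one pass and comparing it with its reversal (objective: simpler).

-- ===== PORT A =====
-- inner while-loop `while left < right and (state >> left & 1) == 0: left += 1`
-- (shift count via .toNat: at every reachable call the pointer is ≥ 0,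
-- exactly where Python's `>>` is defined)
def checkSkipL (state : Int) (l r : Int) : Int :=
  if l < r ∧ PySem.Int.band (state >>> l.toNat) 1 = 0 then checkSkipL state (l + 1) r else l
termination_by (r - l).toNat
decreasing_by omega

-- inner while-loop `while left < right and (state >> right & 1) == 0: right -= 1`
def checkSkipR (state : Int) (l r : Int) : Int :=
  if l < r ∧ PySem.Int.band (state >>> r.toNat) 1 = 0 then checkSkipR state l (r - 1) else r
termination_by (r - l).toNat
decreasing_by omega

-- bounds of the two skip loops (cited by checkLoop's termination proof)
theorem checkSkipL_ge (state l r : Int) : l ≤ checkSkipL state l r := by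
  fun_induction checkSkipL state l r <;> omega

theorem checkSkipR_le (state l r : Int) : checkSkipR state l r ≤ r := by
  fun_induction checkSkipR state l r <;> omega

-- outer while-loop of A
def checkLoop (cs : List Char) (state : Int) (l r : Int) : Bool :=
  if h : l < r then
    let l' := checkSkipL state l r
    let r' := checkSkipR state l' r
    if PySem.List.pyGet? cs l' ≠ PySem.List.pyGet? cs r' then false
    else checkLoop cs state (l' + 1) (r' - 1)
  else true
termination_by (r - l).toNat
decreasing_by
  have h1 := checkSkipL_ge state l r
  have h3 := checkSkipR_le state (checkSkipL state l r) r
  omega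

def check (s : String) (state : Int) : Bool :=
  checkLoop s.toList state 0 (PySem.Str.len s - 1)

-- ===== PORT B =====
def check_alt (s : String) (state : Int) : Bool :=
  let cs := s.toList
  let sub := (List.range cs.length).filterMap
    (fun (i : Nat) => if PySem.Int.band (state >>> i) 1 = 0 then none else cs[i]?)
  sub == sub.reverse

-- ===== PRECONDITION & SPEC =====
def Spec_check (s : String) (state : Int) (out : Bool) : Prop := out = check_alt s state
instance (s : String) (state : Int) (out : Bool) : Decidable (Spec_check s state out) := by unfold Spec_check; infer_instance

-- ===== CLAIM (what is proved, stated in full; the proofs are below) =====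
def Claim_equal_check : Prop := ∀ (s : String) (state : Int), Dom_check s state → Spec_check s state (check s state)

-- ===== LEMMAS AND PROOFS =====

theorem checkSkipL_le (state l r : Int) (h : l ≤ r) : checkSkipL state l r ≤ r := by
  fun_induction checkSkipL state l r <;> omega

theorem checkSkipR_ge (state l r : Int) (h : l ≤ r) : l ≤ checkSkipR state l r := by
  fun_induction checkSkipR state l r <;> omega

-- the subsequence selected by state's bits on the index interval [l, r]
def subI (cs : List Char) (state : Int) (l r : Int) : List Char :=
  if l ≤ r then
    (if PySem.Int.band (state >>> l.toNat) 1 = 0 then [] else cs[l.toNat]?.toList)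
      ++ subI cs state (l + 1) r
  else []
termination_by (r + 1 - l).toNat
decreasing_by omega

theorem subI_nil (cs : List Char) (state : Int) {l r : Int} (h : r < l) :
    subI cs state l r = [] := by
  rw [subI, if_neg (by omega)]

theorem subI_cons (cs : List Char) (state : Int) {l r : Int} (h : l ≤ r) :
    subI cs state l r =
      (if PySem.Int.band (state >>> l.toNat) 1 = 0 then [] else cs[l.toNat]?.toList)
        ++ subI cs state (l + 1) r := by
  rw [subI, if_pos h]

theorem subI_last (cs : List Char) (state : Int) :
    ∀ (n : Nat) (l r : Int), (r - l).toNat ≤ n → l ≤ r →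
      subI cs state l r =
        subI cs state l (r - 1)
          ++ (if PySem.Int.band (state >>> r.toNat) 1 = 0 then [] else cs[r.toNat]?.toList) := by
  intro n
  induction n with
  | zero =>
    intro l r hn hlr
    have hlr' : l = r := by omega
    subst hlr'
    rw [subI_cons cs state (le_refl l), subI_nil cs state (by omega : l < l + 1),
        subI_nil cs state (by omega : l - 1 < l), List.append_nil, List.nil_append]
  | succ n ih =>
    intro l r hn hlr
    by_cases h : l = r
    · subst h
      rw [subI_cons cs state (le_refl l), subI_nil cs state (by omega : l < l + 1),
          subI_nil cs state (by omega : l - 1 < l), List.append_nil, List.nil_append]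
    · rw [subI_cons cs state hlr, ih (l + 1) r (by omega) (by omega),
          subI_cons cs state (by omega : l ≤ r - 1), List.append_assoc]

theorem skipL_subI (cs : List Char) (state l r : Int) :
    subI cs state l r = subI cs state (checkSkipL state l r) r := by
  fun_induction checkSkipL state l r with
  | case1 l hc ih =>
    rw [← ih, subI_cons cs state (by omega : l ≤ r), if_pos hc.2, List.nil_append]
  | case2 => rfl

theorem skipR_subI (cs : List Char) (state l r : Int) :
    subI cs state l r = subI cs state l (checkSkipR state l r) := by
  fun_induction checkSkipR state l r with
  | case1 r hc ih =>
    rw [← ih, subI_last cs state (r - l).toNat l r le_rfl (by omega), if_pos hc.2,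
        List.append_nil]
  | case2 => rfl

theorem skipL_bit (state l r : Int) (h : checkSkipL state l r < r) :
    PySem.Int.band (state >>> (checkSkipL state l r).toNat) 1 ≠ 0 := by
  fun_induction checkSkipL state l r with
  | case1 l hc ih => exact ih h
  | case2 l hc => exact fun hb => hc ⟨h, hb⟩

theorem skipR_bit (state l r : Int) (h : l < checkSkipR state l r) :
    PySem.Int.band (state >>> (checkSkipR state l r).toNat) 1 ≠ 0 := by
  fun_induction checkSkipR state l r with
  | case1 r hc ih => exact ih h
  | case2 r hc => exact fun hb => hc ⟨h, hb⟩

theorem subI_short (cs : List Char) (state : Int) {l r : Int} (h : r ≤ l) :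
    (subI cs state l r).length ≤ 1 := by
  by_cases hlr : l ≤ r
  · rw [subI_cons cs state hlr, subI_nil cs state (by omega : r < l + 1), List.append_nil]
    split
    · simp
    · cases cs[l.toNat]? <;> simp [Option.toList]
  · rw [subI_nil cs state (by omega)]
    simp

theorem pal_short {xs : List Char} (h : xs.length ≤ 1) : (xs == xs.reverse) = true := by
  match xs, h with
  | [], _ => rfl
  | [a], _ => simp

theorem pal_sandwich (a b : Char) (xs : List Char) :
    ((a :: (xs ++ [b])) == (a :: (xs ++ [b])).reverse) = (a == b && (xs == xs.reverse)) := by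
  rw [Bool.eq_iff_iff]
  simp only [Bool.and_eq_true, beq_iff_eq, List.reverse_cons, List.reverse_append,
    List.reverse_nil, List.nil_append, List.cons_append, List.cons.injEq]
  constructor
  · rintro ⟨hab, h2⟩
    exact ⟨hab, (List.append_inj' h2 (by simp)).1⟩
  · rintro ⟨hab, hxs⟩
    subst hab
    exact ⟨rfl, by rw [← hxs]⟩

-- main loop invariant: A's outer loop decides palindromicity of subI l r
theorem loop_eq (cs : List Char) (state : Int) :
    ∀ (n : Nat) (l r : Int), (r - l).toNat ≤ n → 0 ≤ l → r < (cs.length : Int) →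
      checkLoop cs state l r = (subI cs state l r == (subI cs state l r).reverse) := by
  intro n
  induction n with
  | zero =>
    intro l r hn hl hr
    rw [checkLoop, dif_neg (by omega : ¬ l < r)]
    exact (pal_short (subI_short cs state (by omega))).symm
  | succ n ih =>
    intro l r hn hl hr
    by_cases h : l < r
    · rw [checkLoop, dif_pos h]
      have h1 := checkSkipL_ge state l r
      have h2 := checkSkipL_le state l r (le_of_lt h)
      set l' := checkSkipL state l r with hl'
      have h3 := checkSkipR_le state l' r
      have h4 := checkSkipR_ge state l' r h2
      set r' := checkSkipR state l' r with hr'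
      show (if PySem.List.pyGet? cs l' ≠ PySem.List.pyGet? cs r' then false
            else checkLoop cs state (l' + 1) (r' - 1)) =
          (subI cs state l r == (subI cs state l r).reverse)
      have hsub : subI cs state l r = subI cs state l' r' := by
        rw [skipL_subI cs state l r, ← hl', skipR_subI cs state l' r, ← hr']
      by_cases hmeet : l' < r'
      · -- both pointers stopped on selected positions
        have hbl : PySem.Int.band (state >>> l'.toNat) 1 ≠ 0 := by
          rw [hl']; exact skipL_bit state l r (by omega)
        have hbr : PySem.Int.band (state >>> r'.toNat) 1 ≠ 0 := by
          rw [hr']; exact skipR_bit state l' r (by omega)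
        obtain ⟨cl, hcl⟩ : ∃ c, cs[l'.toNat]? = some c :=
          ⟨_, List.getElem?_eq_getElem (by omega)⟩
        obtain ⟨cr, hcr⟩ : ∃ c, cs[r'.toNat]? = some c :=
          ⟨_, List.getElem?_eq_getElem (by omega)⟩
        have hpgl : PySem.List.pyGet? cs l' = some cl := by
          rw [PySem.List.pyGet?_of_nonneg cs (by omega)]; exact hcl
        have hpgr : PySem.List.pyGet? cs r' = some cr := by
          rw [PySem.List.pyGet?_of_nonneg cs (by omega)]; exact hcr
        have hmid := ih (l' + 1) (r' - 1) (by omega) (by omega) (by omega)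
        have hdec : subI cs state l' r' =
            cl :: (subI cs state (l' + 1) (r' - 1) ++ [cr]) := by
          rw [subI_cons cs state (by omega : l' ≤ r'), if_neg hbl, hcl,
              subI_last cs state (r' - (l' + 1)).toNat (l' + 1) r' le_rfl (by omega),
              if_neg hbr, hcr]
          simp [Option.toList]
        rw [hsub, hdec, pal_sandwich, hpgl, hpgr]
        by_cases hceq : cl = cr
        · subst hceq
          rw [if_neg (by simp), hmid]
          simp
        · rw [if_pos (by simp [hceq])]
          simp [hceq]
      · -- pointers met: comparison is of a position with itself; loop ends next
        have hmeet' : l' = r' := by omega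
        rw [if_neg (by simp [hmeet'])]
        rw [ih (l' + 1) (r' - 1) (by omega) (by omega) (by omega), hsub,
            subI_nil cs state (by omega : r' - 1 < l' + 1),
            pal_short (subI_short cs state (by omega : r' ≤ l'))]
        rfl
    · rw [checkLoop, dif_neg h]
      exact (pal_short (subI_short cs state (by omega))).symm

-- B's comprehension equals subI over the whole index range
theorem sub_eq_filterMap (cs : List Char) (state : Int) :
    ∀ (k a : Nat), cs.length - a ≤ k →
      subI cs state (a : Int) ((cs.length : Int) - 1) =
        (List.range' a (cs.length - a)).filterMap
          (fun (i : Nat) => if PySem.Int.band (state >>> i) 1 = 0 then none else cs[i]?) := by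
  intro k
  induction k with
  | zero =>
    intro a ha
    have hle : cs.length ≤ a := by omega
    rw [subI_nil cs state (by omega), show cs.length - a = 0 from by omega]
    rfl
  | succ k ih =>
    intro a ha
    by_cases hlt : a < cs.length
    · rw [show cs.length - a = (cs.length - (a + 1)) + 1 from by omega, List.range'_succ,
          List.filterMap_cons, subI_cons cs state (by omega),
          show ((a : Int) + 1) = (((a + 1 : Nat)) : Int) from by push_cast; ring,
          ih (a + 1) (by omega), Int.toNat_natCast]
      by_cases hb : PySem.Int.band (state >>> a) 1 = 0
      · simp [hb]
      · have hget : cs[a]? = some cs[a] := List.getElem?_eq_getElem hlt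
        simp [hb, hget, Option.toList]
    · have h0 : cs.length - a = 0 := by omega
      rw [h0, subI_nil cs state (by omega)]
      rfl

-- ===== VERDICT (by name: the statement is the Claim_ definition above) =====
theorem check_spec : Claim_equal_check := by
  unfold Claim_equal_check Spec_check
  intro s state _
  unfold check check_alt
  rw [PySem.Str.len_eq]
  rw [loop_eq s.toList state (((s.toList.length : Int) - 1 - 0).toNat) 0
        ((s.toList.length : Int) - 1) le_rfl le_rfl (by omega)]
  have hsf := sub_eq_filterMap s.toList state s.toList.length 0 (by omega)
  rw [Nat.cast_zero] at hsf
  rw [hsf, Nat.sub_zero, ← List.range_eq_range']
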